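-- pv_equiv track=rewrite | github.com/PrestonLeung/SMuPFi-Repository | choplqb.py | find_chop_position
-- ===== SOURCE A (Python) =====
-- def find_chop_position(qual_list, qual_threshold):
--     '''Return a tuple of chop position in the left end and right end.
--
--     The elements which is less than qual_threshold in the left and right end of quality
--     will be chopped.
--
--     The returned position tuple (left, right) is zero-based. So use qual[left:right] can
--     get a copy of remained quality.
--     '''
--     # looking for left side
--     left = 0
--     while left < len(qual_list):
--         if qual_list[left] >= qual_threshold:
--             break
--         left += 1
--     if left == len(qual_list):
--         return left, left
--     # looking for right side
--     right = len(qual_list)-1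
--     while right >= 0:
--         if qual_list[right] >= qual_threshold:
--             break
--         right -= 1
--     return left, right+1
-- ===== SOURCE B (Python) =====
-- def find_chop_position(qual_list, qual_threshold):
--     idx = [i for i, q in enumerate(qual_list) if q >= qual_threshold]
--     if not idx:
--         n = len(qual_list)
--         return n, n
--     return idx[0], idx[-1] + 1
-- ===== Notes on version B (the rewrite author's own statement) =====
-- stated objective: simpler
-- what changed: Replaced the two opposite-direction early-breaking while loops with a single forward pass that collects all indices meeting the threshold and reads its first and last entries.
import Mathlib
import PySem

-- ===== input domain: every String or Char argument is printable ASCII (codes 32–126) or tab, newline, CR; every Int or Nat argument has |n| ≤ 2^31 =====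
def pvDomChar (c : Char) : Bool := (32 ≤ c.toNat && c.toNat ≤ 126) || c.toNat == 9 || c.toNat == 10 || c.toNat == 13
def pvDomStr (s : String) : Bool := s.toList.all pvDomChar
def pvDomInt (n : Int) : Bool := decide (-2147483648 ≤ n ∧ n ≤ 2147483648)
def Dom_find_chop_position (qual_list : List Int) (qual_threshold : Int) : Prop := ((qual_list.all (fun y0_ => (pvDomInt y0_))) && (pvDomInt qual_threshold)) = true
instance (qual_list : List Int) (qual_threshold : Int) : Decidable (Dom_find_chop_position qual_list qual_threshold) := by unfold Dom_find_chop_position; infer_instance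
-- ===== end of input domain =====

-- B replaces A's two opposite-direction early-breaking scans by one forward pass
-- collecting all qualifying indices and reading its first and last entry (objective: simpler).

-- ===== PORT A =====
-- A's left while-loop: advance `left` while the element is below threshold.
def pvALeft (l : List Int) (t : Int) (left : Nat) : Nat :=
  match l with
  | [] => left
  | q :: rest => if t ≤ q then left else pvALeft rest t (left + 1)

-- A's right while-loop: scan indices len-1 … 0 (here: over the reversed list), decrementing `right`.
def pvARight (m : List Int) (t : Int) (right : Int) : Int :=
  match m with
  | [] => right
  | q :: rest => if t ≤ q then right else pvARight rest t (right - 1)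

def find_chop_position (qual_list : List Int) (qual_threshold : Int) : Int × Int :=
  let left := pvALeft qual_list qual_threshold 0
  if left = qual_list.length then ((left : Int), (left : Int))
  else
    let right := pvARight qual_list.reverse qual_threshold ((qual_list.length : Int) - 1)
    ((left : Int), right + 1)

-- ===== PORT B =====
def find_chop_position_alt (qual_list : List Int) (qual_threshold : Int) : Int × Int :=
  let idx := ((PySem.List.enumerate qual_list).filter (fun p => decide (qual_threshold ≤ p.2))).map Prod.fst
  match idx with
  | [] => ((qual_list.length : Int), (qual_list.length : Int))
  | h :: rest => (h, (h :: rest).getLast (by simp) + 1)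

-- ===== PRECONDITION & SPEC =====
def Spec_find_chop_position (qual_list : List Int) (qual_threshold : Int) (out : Int × Int) : Prop := out = find_chop_position_alt qual_list qual_threshold
instance (qual_list : List Int) (qual_threshold : Int) (out : Int × Int) : Decidable (Spec_find_chop_position qual_list qual_threshold out) := by unfold Spec_find_chop_position; infer_instance

-- ===== CLAIM (what is proved, stated in full; the proofs are below) =====
def Claim_equal_find_chop_position : Prop := ∀ (qual_list : List Int) (qual_threshold : Int), Dom_find_chop_position qual_list qual_threshold → Spec_find_chop_position qual_list qual_threshold (find_chop_position qual_list qual_threshold)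

-- ===== LEMMAS AND PROOFS =====

-- A's left scan is an accumulator form of findIdx.
theorem pvALeft_eq (l : List Int) (t : Int) (i : Nat) :
    pvALeft l t i = i + l.findIdx (fun q => decide (t ≤ q)) := by
  induction l generalizing i with
  | nil => simp [pvALeft]
  | cons q rest ih =>
    simp only [pvALeft, List.findIdx_cons]
    split <;> rename_i h <;> simp [h, ih] <;> omega

-- A's right scan subtracts the findIdx of the (reversed) list it walks.
theorem pvARight_eq (m : List Int) (t : Int) (r : Int) :
    pvARight m t r = r - (m.findIdx (fun q => decide (t ≤ q)) : Int) := by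
  induction m generalizing r with
  | nil => simp [pvARight]
  | cons q rest ih =>
    simp only [pvARight, List.findIdx_cons]
    split <;> rename_i h <;> simp [h, ih] <;> omega

-- the index table B builds, with a generic enumeration start
def pvIdx (t : Int) (l : List Int) (s : Int) : List Int :=
  ((PySem.List.enumerate l s).filter (fun p => decide (t ≤ p.2))).map Prod.fst

theorem pvIdx_cons (t x : Int) (xs : List Int) (s : Int) :
    pvIdx t (x :: xs) s = if t ≤ x then s :: pvIdx t xs (s + 1) else pvIdx t xs (s + 1) := by
  simp only [pvIdx, PySem.List.enumerate_cons]
  split <;> rename_i h <;> simp [h]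

theorem pvIdx_concat (t x : Int) (xs : List Int) (s : Int) :
    pvIdx t (xs ++ [x]) s
      = pvIdx t xs s ++ (if t ≤ x then [s + (xs.length : Int)] else []) := by
  simp only [pvIdx, PySem.List.enumerate_append, List.filter_append, List.map_append,
    PySem.List.enumerate_cons, PySem.List.enumerate_nil]
  split <;> rename_i h <;> simp [h]

theorem pvIdx_nil_of_none (t : Int) (l : List Int) (s : Int)
    (h : ∀ q ∈ l, ¬ t ≤ q) : pvIdx t l s = [] := by
  induction l generalizing s with
  | nil => simp [pvIdx]
  | cons x xs ih =>
    rw [pvIdx_cons]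
    have hx : ¬ t ≤ x := h x (by simp)
    simp [hx, ih _ (fun q hq => h q (by simp [hq]))]

theorem pvIdx_head (t : Int) (l : List Int) (s : Int)
    (h : ∃ q ∈ l, t ≤ q) :
    (pvIdx t l s).head? = some (s + (l.findIdx (fun q => decide (t ≤ q)) : Int)) := by
  induction l generalizing s with
  | nil => simp at h
  | cons x xs ih =>
    rw [pvIdx_cons]
    by_cases hx : t ≤ x
    · simp [hx, List.findIdx_cons]
    · have hxs : ∃ q ∈ xs, t ≤ q := by
        rcases h with ⟨q, hq, hqt⟩
        rcases List.mem_cons.mp hq with rfl | hq'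
        · exact absurd hqt hx
        · exact ⟨q, hq', hqt⟩
      simp only [hx, if_false, List.findIdx_cons]
      rw [ih _ hxs]
      simp [hx]
      push_cast
      ring

theorem pvIdx_getLast (t : Int) (l : List Int) (s : Int)
    (h : ∃ q ∈ l, t ≤ q) :
    (pvIdx t l s).getLast? =
      some (s + (l.length : Int) - 1 - (l.reverse.findIdx (fun q => decide (t ≤ q)) : Int)) := by
  induction l using List.reverseRecOn generalizing s with
  | nil => simp at h
  | append_singleton xs x ih =>
    rw [pvIdx_concat]
    by_cases hx : t ≤ x
    · simp [hx, List.findIdx_cons]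
      push_cast
      ring
    · have hxs : ∃ q ∈ xs, t ≤ q := by
        rcases h with ⟨q, hq, hqt⟩
        rcases (List.mem_append.mp hq) with hq' | hq'
        · exact ⟨q, hq', hqt⟩
        · simp at hq'; subst hq'; exact absurd hqt hx
      simp only [hx, if_false, List.append_nil]
      rw [ih _ hxs]
      simp [hx, List.findIdx_cons]
      push_cast
      ring

theorem findIdx_eq_length_of_none (t : Int) (l : List Int)
    (h : ∀ q ∈ l, ¬ t ≤ q) : l.findIdx (fun q => decide (t ≤ q)) = l.length := by
  induction l with
  | nil => simp
  | cons x xs ih =>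
    have hx : ¬ t ≤ x := h x (by simp)
    simp [List.findIdx_cons, hx, ih (fun q hq => h q (by simp [hq]))]

-- ===== VERDICT (by name: the statement is the Claim_ definition above) =====
theorem find_chop_position_spec : Claim_equal_find_chop_position := by
  intro l t _
  unfold Spec_find_chop_position find_chop_position find_chop_position_alt
  by_cases hex : ∃ q ∈ l, t ≤ q
  · have hlt : l.findIdx (fun q => decide (t ≤ q)) < l.length := by
      rcases hex with ⟨q, hq, hqt⟩
      exact List.findIdx_lt_length_of_exists ⟨q, hq, by simpa using hqt⟩
    have hL : pvALeft l t 0 = l.findIdx (fun q => decide (t ≤ q)) := by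
      simpa using pvALeft_eq l t 0
    have hne : pvALeft l t 0 ≠ l.length := by omega
    simp only [hL, hne, if_neg, hne]
    rw [if_neg (by omega : ¬ l.findIdx (fun q => decide (t ≤ q)) = l.length)]
    have hhead := pvIdx_head t l 0 hex
    have hlast := pvIdx_getLast t l 0 hex
    have hRight := pvARight_eq l.reverse t ((l.length : Int) - 1)
    -- B's idx list is pvIdx t l 0; it is nonempty here
    cases hidx : pvIdx t l 0 with
    | nil => rw [hidx] at hhead; simp at hhead
    | cons h rest =>
      rw [hidx] at hhead hlast
      simp only [List.head?] at hhead
      have hh : h = (l.findIdx (fun q => decide (t ≤ q)) : Int) := by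
        simpa using hhead
      have hlast' : (h :: rest).getLast (by simp)
          = (l.length : Int) - 1 - (l.reverse.findIdx (fun q => decide (t ≤ q)) : Int) := by
        have := List.getLast?_eq_getLast (l := h :: rest) (by simp)
        rw [this] at hlast
        simpa using hlast
      simp only [pvIdx] at hidx
      rw [hidx]
      show ((l.findIdx (fun q => decide (t ≤ q)) : Int),
              pvARight l.reverse t ((l.length : Int) - 1) + 1)
          = (h, (h :: rest).getLast (by simp) + 1)
      simp only [Prod.mk.injEq]
      exact ⟨hh.symm, congrArg (· + 1) (hRight.trans hlast'.symm)⟩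
  · push_neg at hex
    have hex' : ∀ q ∈ l, ¬ t ≤ q := fun q hq => not_le.mpr (hex q hq)
    have hfind := findIdx_eq_length_of_none t l hex'
    have hL : pvALeft l t 0 = l.length := by
      simpa [hfind] using pvALeft_eq l t 0
    have hnil := pvIdx_nil_of_none t l 0 hex'
    simp only [pvIdx] at hnil
    simp [hL, hnil]
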